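-- pv_equiv track=rewrite | github.com/raymond-wang01/student-projects | Project 2 - Using Stylometry to Verify Authorship_Raymond Wang.py | conjunctions
-- ===== SOURCE A (Python) =====
-- def conjunctions(text):
--     punc = '!"#$%&()*+,-./:;<=>?@[\\]^_`{|}~'
--     for char in punc:
--         text = text.replace(char, ' ')
--
--     #Removes '--', makes text lowercase and splits text
--     tNoPunc = text.replace('--', ' ')
--     textLower = tNoPunc.lower()
--     textList = textLower.split()
--
--     #Creates dictionary with required conjunctions
--     conjuncList = ["also", "although", "and", "as", "because", "before", "but", "for", "if", "nor", "of",
--                    "or", "since", "that", "though", "until", "when", "whenever", "whereas",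
--                    "which", "while", "yet"]
--     conjunc = dict((i,0) for i in conjuncList)
--
--     #Counts words if they are in conjuncList
--     for word in textList:
--         if word in conjuncList:
--             conjunc[word] = conjunc.get(word, 0) + 1
--
--     return(conjunc)
-- ===== SOURCE B (Python) =====
-- def conjunctions(text):
--     # Single pass over the characters: hand-rolled tokenizer (no replace/lower/split
--     # staging), tallying every token into a counter, then reading off the 22 keys.
--     punc = '!"#$%&()*+,-./:;<=>?@[\\]^_`{|}~'
--     conjuncList = ["also", "although", "and", "as", "because", "before", "but", "for", "if", "nor", "of",
--                    "or", "since", "that", "though", "until", "when", "whenever", "whereas",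
--                    "which", "while", "yet"]
--     tally = {}
--     word = []
--     for c in text + "\n":          # trailing sentinel flushes the last token
--         if c.isspace() or c in punc:
--             if word:
--                 w = ''.join(word)
--                 tally[w] = tally.get(w, 0) + 1
--                 word = []
--         else:
--             word.append(c.lower())
--     return {w: tally.get(w, 0) for w in conjuncList}
-- ===== Notes on version B (the rewrite author's own statement) =====
-- stated objective: alternative
-- what changed: Replaces A's staged pipeline (31 whole-string punctuation replaces, a double-dash replace, lower(), split(), then a token scan updating a pre-initialized dict) with a single hand-rolled character-level pass: a tokenizer that lowercases characters on the fly, flushes words at whitespace/punctuation, tallies every token into a counter dict, and finally reads the 22 conjunction keys off the counter; the per-character Python loop trades C-level string methods for one explicit pass.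
import Mathlib
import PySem

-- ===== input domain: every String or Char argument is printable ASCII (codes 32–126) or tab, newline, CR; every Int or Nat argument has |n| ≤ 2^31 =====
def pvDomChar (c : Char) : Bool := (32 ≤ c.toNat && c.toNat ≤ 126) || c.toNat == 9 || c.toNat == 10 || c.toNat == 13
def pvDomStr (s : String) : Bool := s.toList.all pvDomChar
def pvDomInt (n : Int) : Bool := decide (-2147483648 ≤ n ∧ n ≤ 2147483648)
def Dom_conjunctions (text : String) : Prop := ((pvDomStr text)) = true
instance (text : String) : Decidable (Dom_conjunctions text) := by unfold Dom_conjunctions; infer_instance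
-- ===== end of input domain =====

-- B replaces A's staged pipeline (31 whole-string replaces, then lower, split and a
-- token scan with dict updates) by one hand-rolled character-level tokenizer pass that
-- tallies every token into a counter and reads the 22 keys off it (objective: alternative).

-- shared data constants (identical literals in both Pythons)
def pvPunc : String := "!\"#$%&()*+,-./:;<=>?@[\\]^_`{|}~"
def pvConjuncList : List String :=
  ["also", "although", "and", "as", "because", "before", "but", "for", "if", "nor", "of",
   "or", "since", "that", "though", "until", "when", "whenever", "whereas",
   "which", "while", "yet"]

-- ===== PORT A =====
def conjunctions (text : String) : List (String × Int) :=
  let text1 := pvPunc.toList.foldl (fun t c => PySem.Str.replace t (String.singleton c) " ") text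
  let tNoPunc := PySem.Str.replace text1 "--" " "
  let textLower := PySem.Str.lower tNoPunc
  let textList := PySem.Str.split₀ textLower
  let conjunc : PySem.Dict String Int := pvConjuncList.foldl (fun d i => d.insert i 0) ⟨[]⟩
  let final := textList.foldl
    (fun d word => if pvConjuncList.contains word then d.insert word (d.getD word 0 + 1) else d)
    conjunc
  final.items

-- ===== PORT B =====
-- the tokenizer step of Source B's character loop: flush the current word on a delimiter
-- (whitespace or punctuation), else append the lowered character (words are kept as
-- List Char, the join/str step of Source B being the String.mk boundary)
def pvStep (st : PySem.Dict (List Char) Int × List Char) (c : Char) :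
    PySem.Dict (List Char) Int × List Char :=
  if PySem.Chars.isspace c || pvPunc.toList.contains c then
    if st.2.isEmpty then st
    else (st.1.insert st.2 (st.1.getD st.2 0 + 1), [])
  else (st.1, st.2 ++ [PySem.Chars.lowerChar c])

def conjunctions_alt (text : String) : List (String × Int) :=
  let final := (text.toList ++ ['\n']).foldl pvStep (PySem.Dict.empty, [])
  pvConjuncList.map (fun w => (w, final.1.getD w.toList 0))

-- ===== PRECONDITION & SPEC =====
def Spec_conjunctions (text : String) (out : List (String × Int)) : Prop := out = conjunctions_alt text
instance (text : String) (out : List (String × Int)) : Decidable (Spec_conjunctions text out) := by unfold Spec_conjunctions; infer_instance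

-- ===== CLAIM (what is proved, stated in full; the proofs are below) =====
def Claim_equal_conjunctions : Prop := ∀ (text : String), Dom_conjunctions text → Spec_conjunctions text (conjunctions text)

-- ===== LEMMAS AND PROOFS =====

-- the per-character substitution A's preprocessing amounts to
def pvSubst (c : Char) : Char :=
  PySem.Chars.lowerChar (if pvPunc.toList.contains c then ' ' else c)

-- ---- A-side: the counting loop over the token list ----

lemma init_dict :
    (pvConjuncList.foldl (fun d i => d.insert i 0) (⟨[]⟩ : PySem.Dict String Int))
      = ⟨pvConjuncList.map (fun w => (w, (0 : Int)))⟩ := by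
  rfl

lemma find_map_key (L : List String) (c : String → Int) (w : String) (h : w ∈ L) :
    List.find? (fun p => p.1 == w) (L.map (fun v => (v, c v))) = some (w, c w) := by
  induction L with
  | nil => cases h
  | cons v L ih =>
    by_cases hv : v = w
    · subst hv; simp
    · simp only [List.map_cons, List.find?_cons]
      have hb : (v == w) = false := by simpa using hv
      rw [hb]
      exact ih ((List.mem_cons.mp h).resolve_left fun e => hv e.symm)

lemma loop_inv (ws : List String) (c : String → Int) :
    (ws.foldl
      (fun d word => if pvConjuncList.contains word then d.insert word (d.getD word 0 + 1) else d)
      (⟨pvConjuncList.map (fun w => (w, c w))⟩ : PySem.Dict String Int)).items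
    = pvConjuncList.map (fun w => (w, c w + (PySem.List.count ws w : Int))) := by
  induction ws generalizing c with
  | nil => simp [PySem.List.count]
  | cons w ws ih =>
    rw [List.foldl_cons]
    by_cases h : w ∈ pvConjuncList
    · rw [if_pos (by simpa using h)]
      have hc : (⟨pvConjuncList.map (fun v => (v, c v))⟩ : PySem.Dict String Int).contains w = true := by
        simp only [PySem.Dict.contains]
        exact List.any_eq_true.mpr ⟨(w, c w), List.mem_map_of_mem h, by simp⟩
      have hg : (⟨pvConjuncList.map (fun v => (v, c v))⟩ : PySem.Dict String Int).getD w 0 = c w := by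
        simp [PySem.Dict.getD, PySem.Dict.get?, find_map_key _ _ _ h]
      rw [hg]
      have hins : (⟨pvConjuncList.map (fun v => (v, c v))⟩ : PySem.Dict String Int).insert w (c w + 1)
          = ⟨pvConjuncList.map (fun v => (v, if v = w then c v + 1 else c v))⟩ := by
        simp only [PySem.Dict.insert, hc, if_pos, List.map_map]
        congr 1
        apply List.map_congr_left
        intro v _
        by_cases hv : v = w
        · subst hv; simp
        · simp [Function.comp, hv]
      rw [hins, ih]
      apply List.map_congr_left
      intro v _
      by_cases hv : v = w
      · subst hv
        simp [PySem.List.count]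
        ring
      · have hv' : ¬ w = v := fun e => hv e.symm
        simp [PySem.List.count, hv, hv']
    · rw [if_neg (by simpa using h)]
      rw [ih]
      apply List.map_congr_left
      intro v hvL
      have hv : ¬ w = v := fun e => h (e ▸ hvL)
      simp [PySem.List.count, hv]

-- ---- A-side: the preprocessing pipeline is a per-character map ----

lemma replace_go_single (a : Char) :
    ∀ (fuel : Nat) (l acc : List Char), l.length ≤ fuel →
      PySem.Chars.replace.go [a] [' '] fuel l acc
        = acc.reverse ++ l.map (fun x => if x = a then ' ' else x) := by
  intro fuel
  induction fuel with
  | zero =>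
    intro l acc h
    have : l = [] := List.eq_nil_of_length_eq_zero (Nat.le_zero.mp h)
    subst this
    simp [PySem.Chars.replace.go]
  | succ f ih =>
    intro l acc h
    cases l with
    | nil => simp [PySem.Chars.replace.go]
    | cons c t =>
      simp only [PySem.Chars.replace.go]
      by_cases hc : a = c
      · subst hc
        have hp : List.isPrefixOf [a] (a :: t) = true := by simp [List.isPrefixOf]
        rw [if_pos hp]
        simp only [List.length_cons] at h
        rw [ih _ _ (by simpa using h)]
        simp
      · have hp : List.isPrefixOf [a] (c :: t) = false := by
          simp [List.isPrefixOf]; exact hc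
        rw [if_neg (by simp [hp])]
        simp only [List.length_cons] at h
        rw [ih t (c :: acc) (by omega)]
        have : ¬ c = a := fun e => hc e.symm
        simp [this]

lemma replace_single (a : Char) (l : List Char) :
    PySem.Chars.replace l [a] [' '] = l.map (fun x => if x = a then ' ' else x) := by
  rw [PySem.Chars.replace]
  rw [if_neg (by simp)]
  simpa using replace_go_single a l.length l [] (le_refl _)

lemma replace_go_dd :
    ∀ (fuel : Nat) (l acc : List Char), l.length ≤ fuel → '-' ∉ l →
      PySem.Chars.replace.go ['-', '-'] [' '] fuel l acc = acc.reverse ++ l := by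
  intro fuel
  induction fuel with
  | zero =>
    intro l acc h _
    have : l = [] := List.eq_nil_of_length_eq_zero (Nat.le_zero.mp h)
    subst this; simp [PySem.Chars.replace.go]
  | succ f ih =>
    intro l acc h hm
    cases l with
    | nil => simp [PySem.Chars.replace.go]
    | cons c t =>
      have hc : ¬ c = '-' := fun e => hm (by simp [e])
      simp only [PySem.Chars.replace.go]
      have hp : List.isPrefixOf ['-', '-'] (c :: t) = false := by
        simp [List.isPrefixOf]; exact fun e => absurd e.symm hc
      rw [if_neg (by simp [hp])]
      simp only [List.length_cons] at h
      rw [ih t (c :: acc) (by omega) (fun hx => hm (by simp [hx]))]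
      simp

lemma replace_dd (l : List Char) (h : '-' ∉ l) :
    PySem.Chars.replace l ['-', '-'] [' '] = l := by
  rw [PySem.Chars.replace, if_neg (by simp)]
  simpa using replace_go_dd l.length l [] (le_refl _) h

lemma fold_if_mem (ps : List Char) (x : Char) (h : ' ' ∉ ps) :
    ps.foldl (fun y c => if y = c then ' ' else y) x = if x ∈ ps then ' ' else x := by
  induction ps generalizing x with
  | nil => simp
  | cons c cs ih =>
    have hs : ' ' ∉ cs := fun hx => h (by simp [hx])
    rw [List.foldl_cons]
    by_cases hx : x = c
    · subst hx
      rw [if_pos rfl, ih _ hs, if_pos (List.mem_cons_self)]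
      split <;> rfl
    · rw [if_neg hx, ih _ hs]
      by_cases hm : x ∈ cs
      · rw [if_pos hm, if_pos (by simp [hm])]
      · rw [if_neg hm, if_neg (by simp [hx, hm])]

lemma foldl_replace_toList (ps : List Char) (s : String) :
    (ps.foldl (fun t c => PySem.Str.replace t (String.singleton c) " ") s).toList
      = s.toList.map (fun x => ps.foldl (fun y c => if y = c then ' ' else y) x) := by
  induction ps generalizing s with
  | nil => simp
  | cons c cs ih =>
    rw [List.foldl_cons, ih]
    rw [PySem.Str.toList_replace]
    have h1 : (String.singleton c).toList = [c] := by simp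
    have h2 : (" " : String).toList = [' '] := by rfl
    rw [h1, h2, replace_single, List.map_map]
    apply List.map_congr_left
    intro x _
    simp [Function.comp]

lemma clean_toList (text : String) :
    (PySem.Str.lower (PySem.Str.replace
        (pvPunc.toList.foldl (fun t c => PySem.Str.replace t (String.singleton c) " ") text)
        "--" " ")).toList
      = text.toList.map pvSubst := by
  rw [PySem.Str.toList_lower, PySem.Str.toList_replace]
  have hdd : ("--" : String).toList = ['-', '-'] := by rfl
  have hsp : (" " : String).toList = [' '] := by rfl
  rw [hdd, hsp, foldl_replace_toList]
  have hnd : '-' ∉ text.toList.map (fun x => pvPunc.toList.foldl (fun y c => if y = c then ' ' else y) x) := by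
    intro hmem
    obtain ⟨x, _, hx⟩ := List.mem_map.mp hmem
    rw [fold_if_mem _ _ (by decide)] at hx
    by_cases hp : x ∈ pvPunc.toList
    · rw [if_pos hp] at hx; exact absurd hx (by decide)
    · rw [if_neg hp] at hx; subst hx; exact hp (by decide)
  rw [replace_dd _ hnd]
  rw [PySem.Chars.lower, List.map_map]
  apply List.map_congr_left
  intro x _
  simp only [Function.comp, pvSubst, fold_if_mem _ _ (by decide : ' ' ∉ pvPunc.toList)]
  by_cases hp : x ∈ pvPunc.toList
  · rw [if_pos hp, if_pos (by simpa using hp)]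
  · rw [if_neg hp, if_neg (by simpa using hp)]

-- ---- B-side: the character pass computes the token counter ----

lemma isspace_lowerChar (c : Char) :
    PySem.Chars.isspace (PySem.Chars.lowerChar c) = PySem.Chars.isspace c := by
  simp only [PySem.Chars.lowerChar]
  split
  · rename_i h
    simp only [PySem.Chars.isupper, Bool.and_eq_true, decide_eq_true_eq] at h
    have h2 : 65 ≤ c.toNat := h.1
    have h3 : c.toNat ≤ 90 := h.2
    have h1 : (Char.ofNat (c.toNat + 32)).toNat = c.toNat + 32 := by
      rw [Char.toNat_ofNat, if_pos (Or.inl (by omega))]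
    simp only [PySem.Chars.isspace, h1]
    rw [Bool.eq_iff_iff]
    simp only [Bool.or_eq_true, Bool.and_eq_true, decide_eq_true_eq]
    omega
  · rfl

lemma delim_eq (c : Char) :
    (PySem.Chars.isspace c || pvPunc.toList.contains c)
      = PySem.Chars.isspace (pvSubst c) := by
  unfold pvSubst
  by_cases hp : pvPunc.toList.contains c = true
  · rw [if_pos hp, hp]
    simp [show PySem.Chars.lowerChar ' ' = ' ' from rfl]
    decide
  · have hf : pvPunc.toList.contains c = false := Bool.of_not_eq_true hp
    rw [if_neg hp, isspace_lowerChar, hf, Bool.or_false]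

lemma split_go_acc (l : List Char) :
    ∀ (cur : List Char) (acc : List (List Char)),
    PySem.Chars.split₀.go l cur acc = acc.reverse ++ PySem.Chars.split₀.go l cur [] := by
  induction l with
  | nil =>
    intro cur acc
    simp only [PySem.Chars.split₀.go]
    split <;> simp
  | cons c t ih =>
    intro cur acc
    simp only [PySem.Chars.split₀.go]
    split
    · split
      · exact ih [] acc
      · rw [ih [] (cur.reverse :: acc), ih [] [cur.reverse]]
        simp
    · exact ih (c :: cur) acc

lemma tok_fold (cs : List Char) :
    ∀ (d : PySem.Dict (List Char) Int) (cur : List Char),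
    ((cs ++ ['\n']).foldl pvStep (d, cur)).1
      = (PySem.Chars.split₀.go (cs.map pvSubst) cur.reverse []).foldl
          (fun d w => d.insert w (d.getD w 0 + 1)) d := by
  induction cs with
  | nil =>
    intro d cur
    simp only [List.nil_append, List.foldl_cons, List.foldl_nil, List.map_nil]
    simp only [PySem.Chars.split₀.go]
    unfold pvStep
    rw [if_pos (by decide)]
    cases cur with
    | nil => simp
    | cons x xs => simp
  | cons c t ih =>
    intro d cur
    simp only [List.cons_append, List.foldl_cons, List.map_cons]
    by_cases hd : (PySem.Chars.isspace c || pvPunc.toList.contains c) = true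
    · have hs : PySem.Chars.isspace (pvSubst c) = true := by rw [← delim_eq]; exact hd
      simp only [PySem.Chars.split₀.go, hs, if_pos]
      cases cur with
      | nil =>
        have hstep : pvStep (d, ([] : List Char)) c = (d, []) := by
          unfold pvStep; rw [if_pos hd]; rfl
        rw [hstep]
        simp only [List.reverse_nil, List.isEmpty_nil, if_pos]
        exact ih d []
      | cons x xs =>
        have hstep : pvStep (d, x :: xs) c
            = (d.insert (x :: xs) (d.getD (x :: xs) 0 + 1), []) := by
          unfold pvStep; rw [if_pos hd]; rfl
        rw [hstep, if_neg (by simp)]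
        rw [ih _ []]
        rw [split_go_acc _ [] [(x :: xs).reverse.reverse]]
        simp
    · have hs : PySem.Chars.isspace (pvSubst c) = false := by
        rw [← delim_eq]; exact Bool.of_not_eq_true hd
      have hnp : pvPunc.toList.contains c = false := by
        rcases Bool.or_eq_false_iff.mp (Bool.of_not_eq_true hd) with ⟨_, h2⟩
        exact h2
      have hsub : pvSubst c = PySem.Chars.lowerChar c := by
        have hnm : c ∉ pvPunc.toList := by simpa using hnp
        unfold pvSubst
        rw [if_neg (by simpa using hnm)]
      simp only [PySem.Chars.split₀.go, hs]
      rw [if_neg (by simp)]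
      have hstep : pvStep (d, cur) c = (d, cur ++ [PySem.Chars.lowerChar c]) := by
        unfold pvStep; rw [if_neg hd]
      rw [hstep, ih d (cur ++ [PySem.Chars.lowerChar c]), hsub]
      simp

lemma toList_injective : Function.Injective String.toList := by
  intro a b h
  have h2 := congrArg String.ofList h
  rwa [String.ofList_toList, String.ofList_toList] at h2

-- ===== VERDICT (by name: the statement is the Claim_ definition above) =====
set_option maxRecDepth 4096 in
theorem conjunctions_spec : Claim_equal_conjunctions := by
  intro text _
  unfold Spec_conjunctions conjunctions conjunctions_alt
  simp only []
  rw [init_dict, loop_inv]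
  rw [tok_fold text.toList PySem.Dict.empty []]
  simp only [List.reverse_nil]
  have htoks : PySem.Chars.split₀.go (text.toList.map pvSubst) [] []
      = PySem.Chars.split₀ (text.toList.map pvSubst) := rfl
  rw [htoks, ← clean_toList text, PySem.Dict.foldl_insert_getD_add_one_eq_counter]
  apply List.map_congr_left
  intro w _
  rw [PySem.Dict.getD_counter, zero_add, PySem.List.count_eq,
      ← List.count_map_of_injective _ String.toList toList_injective w,
      PySem.Str.split₀_map_toList]
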